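-- pv_equiv track=rewrite | github.com/sandialabs/JaqalPaw | src/jaqalpaw/bytecode/lut_programming.py | generate_gate_addr_range_LUT
-- ===== SOURCE A (Python) =====
-- def generate_gate_addr_range_LUT(FullGateList):
--     """Create dictionaries that contain the raw data and addresses
--     that are used to program the GLUT and SLUT, the IRGLUT contains
--     and intermediate representation for inspection/debugging"""
--     GLUT = dict()
--     IRGLUT = dict()
--     SLUT = dict()
--     addrcntr = 0
--     for n, l in enumerate(FullGateList):
--         addrcntrloc = addrcntr
--         for i in l:
--             SLUT[addrcntrloc] = i
--             addrcntrloc += 1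
--         IRGLUT[tuple(l)] = (addrcntr, addrcntr + len(l) - 1)
--         GLUT[n] = (addrcntr, addrcntr + len(l) - 1)
--         addrcntr += len(l)
--     return IRGLUT, SLUT, GLUT
-- ===== SOURCE B (Python) =====
-- def generate_gate_addr_range_LUT(FullGateList):
--     """Prefix-sum decomposition: compute each gate's start offset once,
--     then build the three tables independently."""
--     offsets = []
--     total = 0
--     for l in FullGateList:
--         offsets.append(total)
--         total += len(l)
--     IRGLUT = {tuple(l): (off, off + len(l) - 1)
--               for l, off in zip(FullGateList, offsets)}
--     GLUT = {n: (off, off + len(l) - 1)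
--             for n, (l, off) in enumerate(zip(FullGateList, offsets))}
--     flat = [x for l in FullGateList for x in l]
--     SLUT = dict(enumerate(flat))
--     return IRGLUT, SLUT, GLUT
-- ===== Notes on version B (the rewrite author's own statement) =====
-- stated objective: alternative
-- what changed: Replaces A's single interleaved loop with running counters by a prefix-sum pass computing each gate's start offset, after which IRGLUT/GLUT are built by independent comprehensions over zip(gates, offsets) and SLUT by enumerating the flattened list.
import Mathlib
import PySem

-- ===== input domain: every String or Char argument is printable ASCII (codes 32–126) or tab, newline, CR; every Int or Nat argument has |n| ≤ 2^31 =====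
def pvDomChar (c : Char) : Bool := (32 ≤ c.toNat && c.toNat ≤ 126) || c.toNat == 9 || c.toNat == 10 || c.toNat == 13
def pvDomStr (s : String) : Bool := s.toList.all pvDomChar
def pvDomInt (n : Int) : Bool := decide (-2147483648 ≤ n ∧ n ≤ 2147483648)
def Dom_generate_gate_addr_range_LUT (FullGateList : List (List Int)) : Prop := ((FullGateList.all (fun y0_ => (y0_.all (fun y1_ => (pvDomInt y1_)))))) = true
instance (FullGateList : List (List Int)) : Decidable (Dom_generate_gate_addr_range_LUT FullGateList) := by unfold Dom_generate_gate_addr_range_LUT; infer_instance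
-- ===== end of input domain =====

-- B replaces A's interleaved counter loop by a prefix-sum offsets pass plus three
-- independent table builds (alternative decomposition; same asymptotic cost).

-- ===== PORT A =====
-- one loop over enumerate(FullGateList) carrying (GLUT, IRGLUT, SLUT, addrcntr);
-- the inner loop over l carries (SLUT, addrcntrloc)
def generate_gate_addr_range_LUT (FullGateList : List (List Int)) : (List (List Int × Int × Int)) × (List (Int × Int)) × (List (Int × Int × Int)) :=
  let st := (PySem.List.enumerate FullGateList 0).foldl
    (fun (st : PySem.Dict Int (Int × Int) × PySem.Dict (List Int) (Int × Int) × PySem.Dict Int Int × Int) nl =>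
      let GLUT := st.1
      let IRGLUT := st.2.1
      let SLUT := st.2.2.1
      let addrcntr := st.2.2.2
      let n := nl.1
      let l := nl.2
      let SLUT := (l.foldl (fun (p : PySem.Dict Int Int × Int) i => (p.1.insert p.2 i, p.2 + 1)) (SLUT, addrcntr)).1
      let IRGLUT := IRGLUT.insert l (addrcntr, addrcntr + (l.length : Int) - 1)
      let GLUT := GLUT.insert n (addrcntr, addrcntr + (l.length : Int) - 1)
      (GLUT, IRGLUT, SLUT, addrcntr + (l.length : Int)))
    (PySem.Dict.empty, PySem.Dict.empty, PySem.Dict.empty, 0)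
  (st.2.1.items, st.2.2.1.items, st.1.items)

-- ===== PORT B =====
-- prefix-sum pass producing offsets, then three independent dict builds
def generate_gate_addr_range_LUT_alt (FullGateList : List (List Int)) : (List (List Int × Int × Int)) × (List (Int × Int)) × (List (Int × Int × Int)) :=
  let offsets := (FullGateList.foldl
    (fun (p : List Int × Int) l => (p.1 ++ [p.2], p.2 + (l.length : Int))) ([], 0)).1
  let IRGLUT := (FullGateList.zip offsets).foldl
    (fun (d : PySem.Dict (List Int) (Int × Int)) p => d.insert p.1 (p.2, p.2 + (p.1.length : Int) - 1))
    PySem.Dict.empty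
  let GLUT := (PySem.List.enumerate (FullGateList.zip offsets) 0).foldl
    (fun (d : PySem.Dict Int (Int × Int)) p => d.insert p.1 (p.2.2, p.2.2 + (p.2.1.length : Int) - 1))
    PySem.Dict.empty
  let flat := FullGateList.flatten
  let SLUT := (PySem.List.enumerate flat 0).foldl
    (fun (d : PySem.Dict Int Int) p => d.insert p.1 p.2) PySem.Dict.empty
  (IRGLUT.items, SLUT.items, GLUT.items)

-- ===== PRECONDITION & SPEC =====
def Spec_generate_gate_addr_range_LUT (FullGateList : List (List Int)) (out : (List (List Int × Int × Int)) × (List (Int × Int)) × (List (Int × Int × Int))) : Prop := out = generate_gate_addr_range_LUT_alt FullGateList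
instance (FullGateList : List (List Int)) (out : (List (List Int × Int × Int)) × (List (Int × Int)) × (List (Int × Int × Int))) : Decidable (Spec_generate_gate_addr_range_LUT FullGateList out) := by unfold Spec_generate_gate_addr_range_LUT; infer_instance

-- ===== CLAIM (what is proved, stated in full; the proofs are below) =====
def Claim_equal_generate_gate_addr_range_LUT : Prop := ∀ (FullGateList : List (List Int)), Dom_generate_gate_addr_range_LUT FullGateList → Spec_generate_gate_addr_range_LUT FullGateList (generate_gate_addr_range_LUT FullGateList)

-- ===== LEMMAS AND PROOFS =====

/-- Start offsets of the gates when the first gate starts at `c` (recursive form). -/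
def pvOffs (c : Int) : List (List Int) → List Int
  | [] => []
  | l :: rest => c :: pvOffs (c + (l.length : Int)) rest

/-- B's offsets loop computes `pvOffs`. -/
theorem pvOffs_foldl (gates : List (List Int)) (acc : List Int) (c : Int) :
    gates.foldl (fun (p : List Int × Int) l => (p.1 ++ [p.2], p.2 + (l.length : Int))) (acc, c)
      = (acc ++ pvOffs c gates, c + ((gates.map List.length).sum : Int)) := by
  induction gates generalizing acc c with
  | nil => simp [pvOffs]
  | cons l rest ih => simp [pvOffs, ih, List.append_assoc]; ring

/-- `enumerate` distributes over append. -/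
theorem pvEnumerate_append {α : Type} (xs ys : List α) (s : Int) :
    PySem.List.enumerate (xs ++ ys) s
      = PySem.List.enumerate xs s ++ PySem.List.enumerate ys (s + (xs.length : Int)) := by
  induction xs generalizing s with
  | nil => simp [PySem.List.enumerate_nil]
  | cons x xs ih =>
      simp [PySem.List.enumerate_cons, ih]
      ring_nf

/-- A's inner SLUT loop equals a fold over `enumerate l c`. -/
theorem pvInner (l : List Int) (S : PySem.Dict Int Int) (c : Int) :
    l.foldl (fun (p : PySem.Dict Int Int × Int) i => (p.1.insert p.2 i, p.2 + 1)) (S, c)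
      = ((PySem.List.enumerate l c).foldl (fun (d : PySem.Dict Int Int) p => d.insert p.1 p.2) S,
         c + (l.length : Int)) := by
  induction l generalizing S c with
  | nil => simp [PySem.List.enumerate_nil]
  | cons x xs ih => simp [PySem.List.enumerate_cons, ih]; ring

/-- Main invariant: A's single fold is the interleaving of B's three independent folds. -/
theorem pvMain (gates : List (List Int)) (n c : Int)
    (G : PySem.Dict Int (Int × Int)) (I : PySem.Dict (List Int) (Int × Int)) (S : PySem.Dict Int Int) :
    (PySem.List.enumerate gates n).foldl
      (fun (st : PySem.Dict Int (Int × Int) × PySem.Dict (List Int) (Int × Int) × PySem.Dict Int Int × Int) nl =>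
        let GLUT := st.1
        let IRGLUT := st.2.1
        let SLUT := st.2.2.1
        let addrcntr := st.2.2.2
        let k := nl.1
        let l := nl.2
        let SLUT := (l.foldl (fun (p : PySem.Dict Int Int × Int) i => (p.1.insert p.2 i, p.2 + 1)) (SLUT, addrcntr)).1
        let IRGLUT := IRGLUT.insert l (addrcntr, addrcntr + (l.length : Int) - 1)
        let GLUT := GLUT.insert k (addrcntr, addrcntr + (l.length : Int) - 1)
        (GLUT, IRGLUT, SLUT, addrcntr + (l.length : Int)))
      (G, I, S, c)
    = ((PySem.List.enumerate (gates.zip (pvOffs c gates)) n).foldl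
         (fun (d : PySem.Dict Int (Int × Int)) p => d.insert p.1 (p.2.2, p.2.2 + (p.2.1.length : Int) - 1)) G,
       (gates.zip (pvOffs c gates)).foldl
         (fun (d : PySem.Dict (List Int) (Int × Int)) p => d.insert p.1 (p.2, p.2 + (p.1.length : Int) - 1)) I,
       (PySem.List.enumerate gates.flatten c).foldl
         (fun (d : PySem.Dict Int Int) p => d.insert p.1 p.2) S,
       c + ((gates.map List.length).sum : Int)) := by
  induction gates generalizing n c G I S with
  | nil => simp [pvOffs, PySem.List.enumerate_nil]
  | cons l rest ih =>
      rw [PySem.List.enumerate_cons, List.foldl_cons, ih]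
      simp only [pvInner, pvOffs, List.flatten_cons, List.zip_cons_cons,
        PySem.List.enumerate_cons, List.foldl_cons, pvEnumerate_append, List.foldl_append,
        List.map_cons, List.sum_cons]
      push_cast
      ring_nf

-- ===== VERDICT (by name: the statement is the Claim_ definition above) =====
theorem generate_gate_addr_range_LUT_spec : Claim_equal_generate_gate_addr_range_LUT := by
  intro FullGateList _
  unfold Spec_generate_gate_addr_range_LUT
  unfold generate_gate_addr_range_LUT generate_gate_addr_range_LUT_alt
  rw [pvMain, pvOffs_foldl]
  simp
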